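-- pv_equiv track=rewrite | github.com/noishi-bot/noishi | noishi/sms.py | at_expect
-- ===== SOURCE A (Python) =====
-- def at_expect(text: str, expected: str) -> list[str]:
--     result = []
--     lines = text.splitlines()
--     for line in lines:
--         line = line.strip()
--         if not line:
--             continue
--         if line == "OK":
--             break
--         if line == "ERROR":
--             raise RuntimeError("AT command error")
--         if expected and line.startswith(expected):
--             result.append(line[len(expected):].lstrip())
--     return result
-- ===== SOURCE B (Python) =====
-- def at_expect(text: str, expected: str) -> list[str]:
--     lines = [l.strip() for l in text.splitlines()]
--     try:
--         end = lines.index("OK")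
--     except ValueError:
--         end = len(lines)
--     seg = lines[:end]
--     if "ERROR" in seg:
--         raise RuntimeError("AT command error")
--     return [l[len(expected):].lstrip() for l in seg
--             if l and expected and l.startswith(expected)]
-- ===== Notes on version B (the rewrite author's own statement) =====
-- stated objective: simpler
-- what changed: Replaces the single stateful loop with early break/continue/raise by three declarative passes: strip all lines, locate the first 'OK' terminator with list.index and slice the segment, validate it has no 'ERROR', then a comprehension extracts the matching payloads.
import Mathlib
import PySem

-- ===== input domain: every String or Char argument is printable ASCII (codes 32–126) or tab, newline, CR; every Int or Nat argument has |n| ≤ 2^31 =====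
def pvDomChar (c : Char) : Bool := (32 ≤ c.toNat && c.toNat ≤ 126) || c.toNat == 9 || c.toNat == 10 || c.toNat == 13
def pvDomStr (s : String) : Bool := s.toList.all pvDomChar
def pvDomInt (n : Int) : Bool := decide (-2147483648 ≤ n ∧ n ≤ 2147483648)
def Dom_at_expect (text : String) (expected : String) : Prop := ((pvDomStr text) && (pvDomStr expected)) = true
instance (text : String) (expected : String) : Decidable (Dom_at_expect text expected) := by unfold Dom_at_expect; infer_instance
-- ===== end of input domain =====

-- B replaces A's single stateful loop (break/continue/raise interleaved) by three
-- declarative passes: strip all lines, cut at the first "OK", validate, then filter+map.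
-- Objective: simpler. Equivalence of the RETURN value on Pre_ (where A does not raise).

-- ===== PORT A =====
-- the for-loop of A: acc is `result`; on "OK" return acc (break); on "ERROR" Python
-- raises RuntimeError (excluded by Pre_; the port returns acc there)
def at_expect_goA (expected : String) (acc : List String) : List String → List String
  | [] => acc
  | l :: rest =>
    let line := PySem.Str.strip l
    if line == "" then at_expect_goA expected acc rest
    else if line == "OK" then acc
    else if line == "ERROR" then acc
    else if !(expected == "") && PySem.Str.startswith line expected then
      at_expect_goA expected
        (acc ++ [PySem.Str.lstrip (PySem.Str.slice line (some (PySem.Str.len expected)) none)]) rest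
    else at_expect_goA expected acc rest

def at_expect (text : String) (expected : String) : List String :=
  at_expect_goA expected [] (PySem.Str.splitlines text)

-- ===== PORT B =====
def at_expect_alt (text : String) (expected : String) : List String :=
  let lines := (PySem.Str.splitlines text).map PySem.Str.strip
  let stop : Nat := (PySem.List.index? lines "OK").getD lines.length
  let seg := PySem.List.slice lines none (some (stop : Int))
  if seg.contains "ERROR" then []   -- Python B raises RuntimeError here (outside Pre_)
  else (seg.filter (fun l => !(l == "") && !(expected == "") && PySem.Str.startswith l expected)).map
    (fun l => PySem.Str.lstrip (PySem.Str.slice l (some (PySem.Str.len expected)) none))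

-- ===== PRECONDITION & SPEC =====
-- Pre_ excludes exactly the inputs on which A raises RuntimeError: a stripped line
-- equal to "ERROR" occurring before the first stripped line equal to "OK".
def Pre_at_expect (text : String) (expected : String) : Prop :=
  "ERROR" ∉ ((PySem.Str.splitlines text).map PySem.Str.strip).takeWhile (fun l => l != "OK")
instance (text : String) (expected : String) : Decidable (Pre_at_expect text expected) := by
  unfold Pre_at_expect; infer_instance

def pvWitness_at_expect : String × String := ("+CMGL: 1\nOK\n", "+CMGL:")

def Spec_at_expect (text : String) (expected : String) (out : List String) : Prop := out = at_expect_alt text expected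
instance (text : String) (expected : String) (out : List String) : Decidable (Spec_at_expect text expected out) := by unfold Spec_at_expect; infer_instance

-- ===== CLAIM (what is proved, stated in full; the proofs are below) =====
def Claim_equal_at_expect : Prop := ∀ (text : String) (expected : String), Dom_at_expect text expected → Pre_at_expect text expected → Spec_at_expect text expected (at_expect text expected)

-- ===== LEMMAS AND PROOFS =====

-- B's locate-then-slice equals takeWhile on the stripped lines
lemma take_index_eq_takeWhile (ls : List String) :
    ls.take ((PySem.List.index? ls "OK").getD ls.length)
      = ls.takeWhile (fun l => l != "OK") := by
  induction ls with
  | nil => simp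
  | cons x rest ih =>
    by_cases hx : x = "OK"
    · subst hx
      rw [PySem.List.index?_cons_self]
      simp [List.takeWhile_cons]
    · rw [PySem.List.index?_cons_of_ne rest hx]
      have : ((PySem.List.index? rest "OK").map (· + 1)).getD (rest.length + 1)
          = (PySem.List.index? rest "OK").getD rest.length + 1 := by
        cases PySem.List.index? rest "OK" <;> simp
      simp only [List.length_cons, this, List.take_succ_cons, List.takeWhile_cons,
        show (x != "OK") = true by simpa using hx, if_true]
      rw [ih]

-- A's loop equals B's filter/map on the takeWhile segment, given no "ERROR" in it
lemma goA_eq (expected : String) (ls : List String) (acc : List String)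
    (h : "ERROR" ∉ (ls.map PySem.Str.strip).takeWhile (fun l => l != "OK")) :
    at_expect_goA expected acc ls
      = acc ++ (((ls.map PySem.Str.strip).takeWhile (fun l => l != "OK")).filter
          (fun l => !(l == "") && !(expected == "") && PySem.Str.startswith l expected)).map
          (fun l => PySem.Str.lstrip (PySem.Str.slice l (some (PySem.Str.len expected)) none)) := by
  induction ls generalizing acc with
  | nil => simp [at_expect_goA]
  | cons l rest ih =>
    simp only [List.map_cons, List.takeWhile_cons] at h ⊢
    by_cases hOK : PySem.Str.strip l = "OK"
    · simp [at_expect_goA, hOK]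
    · have hb : (PySem.Str.strip l != "OK") = true := by simpa using hOK
      simp only [hb, if_true, eq_self_iff_true, List.mem_cons, not_or] at h ⊢
      obtain ⟨hne, htail⟩ := h
      by_cases hemp : PySem.Str.strip l = ""
      · simp only [at_expect_goA, hemp]
        simp [ih _ htail]
      · have hOKb : (PySem.Str.strip l == "OK") = false := by simpa using hOK
        have hempb : (PySem.Str.strip l == "") = false := by simpa using hemp
        have hERRb : (PySem.Str.strip l == "ERROR") = false := by
          simp only [beq_eq_false_iff_ne, ne_eq]; exact fun hc => hne (hc ▸ rfl)
        by_cases hc : (!(expected == "") && PySem.Str.startswith (PySem.Str.strip l) expected) = true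
        · simp only [at_expect_goA, hempb, hOKb, hERRb, hc, List.filter_cons]
          rw [ih _ htail]
          have hexp : ¬ expected = "" := by
            intro he; subst he; simp at hc
          have hst : PySem.Chars.startswith (PySem.Chars.strip l.toList) expected.toList = true := by
            have h2 := hc
            simp only [Bool.and_eq_true] at h2
            simpa using h2.2
          rw [ih _ htail]
          simp [hexp, hst, hc]
        · have hcf : (!(expected == "") && PySem.Str.startswith (PySem.Str.strip l) expected) = false := by
            simpa using hc
          simp only [at_expect_goA, hempb, hOKb, hERRb, hcf, List.filter_cons]
          rw [ih _ htail]
          have hcond : ¬(¬expected = "" ∧ PySem.Chars.startswith (PySem.Chars.strip l.toList) expected.toList = true) := by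
            rintro ⟨hexp, hst⟩
            have hT : (!(expected == "") && PySem.Str.startswith (PySem.Str.strip l) expected) = true := by
              simp only [Bool.and_eq_true, Bool.not_eq_true', beq_eq_false_iff_ne]
              exact ⟨hexp, by simpa using hst⟩
            rw [hcf] at hT
            exact Bool.false_ne_true hT
          simp [hcond]

-- ===== VERDICT (by name: the statement is the Claim_ definition above) =====
theorem at_expect_spec : Claim_equal_at_expect := by
  intro text expected _ hpre
  unfold Spec_at_expect at_expect at_expect_alt
  unfold Pre_at_expect at hpre
  have hseg : PySem.List.slice ((PySem.Str.splitlines text).map PySem.Str.strip) none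
      (some (((PySem.List.index? ((PySem.Str.splitlines text).map PySem.Str.strip) "OK").getD
        ((PySem.Str.splitlines text).map PySem.Str.strip).length : Nat) : Int))
      = ((PySem.Str.splitlines text).map PySem.Str.strip).takeWhile (fun l => l != "OK") := by
    rw [PySem.List.slice_to_natCast, take_index_eq_takeWhile]
  simp only [hseg]
  have hcontains : (((PySem.Str.splitlines text).map PySem.Str.strip).takeWhile
      (fun l => l != "OK")).contains "ERROR" = false := by
    simpa using hpre
  rw [hcontains]
  simp only [Bool.false_eq_true, if_false]
  exact goA_eq expected (PySem.Str.splitlines text) [] hpre
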